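-- pv_equiv track=rewrite | github.com/kevinnbass/TestMaster | testmaster/streaming/incremental_enhancer.py | _enhance_logic
-- ===== SOURCE A (Python) =====
-- def _enhance_logic(content: str) -> str:
--     """Enhance test logic and flow."""
--     # Add setup/teardown if missing
--     if 'def setUp(self):' not in content and 'class Test' in content:
--         # Find class definition and add setUp
--         lines = content.split('\n')
--         for i, line in enumerate(lines):
--             if line.strip().startswith('class Test') and line.endswith(':'):
--                 setup_method = [
--                     '',
--                     '    def setUp(self):',
--                     '        """Set up test fixtures."""',
--                     '        pass',
--                     ''
--                 ]
--                 lines[i+1:i+1] = setup_method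
--                 break
--         content = '\n'.join(lines)
--
--     # Improve placeholder tests
--     content = content.replace(
--         'self.assertTrue(True)',
--         'self.assertIsNotNone(None)  # TODO: Implement meaningful assertion'
--     )
--
--     return content
-- ===== SOURCE B (Python) =====
-- def _enhance_logic(content: str) -> str:
--     """Enhance test logic and flow."""
--     # Scan the raw string by line boundaries (str.find) and splice the setUp
--     # block into the string at the end offset of the first matching class
--     # header; no line list is ever built or re-joined.
--     if 'def setUp(self):' not in content and 'class Test' in content:
--         start = 0
--         n = len(content)
--         while True:
--             end = content.find('\n', start)
--             stop = n if end == -1 else end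
--             line = content[start:stop]
--             if line.strip().startswith('class Test') and line.endswith(':'):
--                 block = ('\n\n    def setUp(self):'
--                          '\n        """Set up test fixtures."""'
--                          '\n        pass\n')
--                 content = content[:stop] + block + content[stop:]
--                 break
--             if end == -1:
--                 break
--             start = end + 1
--     return content.replace(
--         'self.assertTrue(True)',
--         'self.assertIsNotNone(None)  # TODO: Implement meaningful assertion'
--     )
-- ===== Notes on version B (the rewrite author's own statement) =====
-- stated objective: alternative
-- what changed: A splits the content into a line list, scans it with enumerate to find an index, splices five lines into the list and re-joins; B never builds a line list: it walks the raw string with str.find over line boundaries, checks each slice in place, and splices one block string into the content at the matching line's end offset.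
import Mathlib
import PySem

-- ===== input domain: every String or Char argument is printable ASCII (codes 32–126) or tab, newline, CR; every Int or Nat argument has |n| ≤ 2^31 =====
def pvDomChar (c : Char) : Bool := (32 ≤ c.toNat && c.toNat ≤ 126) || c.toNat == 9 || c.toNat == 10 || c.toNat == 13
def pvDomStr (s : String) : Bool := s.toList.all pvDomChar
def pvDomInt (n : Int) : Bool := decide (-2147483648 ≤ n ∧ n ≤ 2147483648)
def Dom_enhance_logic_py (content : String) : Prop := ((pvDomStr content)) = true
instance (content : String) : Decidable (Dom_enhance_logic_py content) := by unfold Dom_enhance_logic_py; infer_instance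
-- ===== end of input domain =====

-- B never builds a line list: it scans the raw string by line boundaries and splices one
-- block string into the content at the matching line's end offset (alternative, same cost).

-- the matching-line predicate, identical text in both Pythons (on char lists)
def pvCondC (line : List Char) : Bool :=
  PySem.Chars.startswith (PySem.Chars.strip line) "class Test".toList
    && PySem.Chars.endswith line ":".toList

-- ===== PORT A =====
-- the five inserted lines of A
def pvSetup : List String :=
  ["", "    def setUp(self):", "        \"\"\"Set up test fixtures.\"\"\"", "        pass", ""]

def pvCond (line : String) : Bool :=
  PySem.Str.startswith (PySem.Str.strip line) "class Test" && PySem.Str.endswith line ":"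

-- for i, line in enumerate(lines): if cond: lines[i+1:i+1] = setup_method; break
def aLoop (lines : List String) (i : Nat) (rest : List String) : List String :=
  match rest with
  | [] => lines
  | l :: rs =>
    if pvCond l then lines.take (i + 1) ++ pvSetup ++ lines.drop (i + 1)
    else aLoop lines (i + 1) rs

def enhance_logic_py (content : String) : String :=
  let content :=
    if !PySem.Str.isIn "def setUp(self):" content && PySem.Str.isIn "class Test" content then
      let lines := (PySem.Str.split? content "\n").getD []
      PySem.Str.join "\n" (aLoop lines 0 lines)
    else content
  PySem.Str.replace content "self.assertTrue(True)"
    "self.assertIsNotNone(None)  # TODO: Implement meaningful assertion"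

-- ===== PORT B =====
-- the block B splices in at the end offset of the matching line
def pvBlock : List Char :=
  "\n\n    def setUp(self):\n        \"\"\"Set up test fixtures.\"\"\"\n        pass\n".toList

-- while True: end = content.find('\n', start); line = content[start:stop]; …
-- rendered structurally: the slice content[start:stop] is the prefix up to the first '\n'
-- (takeWhile), content[stop:] the rest (dropWhile); advancing start past '\n' is the recursion.
def bScan (cs : List Char) : List Char :=
  let line := cs.takeWhile (· != '\n')
  let rest := cs.dropWhile (· != '\n')
  if pvCondC line then line ++ pvBlock ++ rest
  else
    match h : rest with
    | [] => cs
    | _ :: rs => line ++ '\n' :: bScan rs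
termination_by cs.length
decreasing_by
  have : rest.length ≤ cs.length := by
    simpa using List.length_dropWhile_le (p := (fun c => c != '\n')) (l := cs)
  simp [h] at this; omega

def enhance_logic_py_alt (content : String) : String :=
  let content :=
    if !PySem.Str.isIn "def setUp(self):" content && PySem.Str.isIn "class Test" content then
      String.ofList (bScan content.toList)
    else content
  PySem.Str.replace content "self.assertTrue(True)"
    "self.assertIsNotNone(None)  # TODO: Implement meaningful assertion"

-- ===== PRECONDITION & SPEC =====
def Spec_enhance_logic_py (content : String) (out : String) : Prop := out = enhance_logic_py_alt content
instance (content : String) (out : String) : Decidable (Spec_enhance_logic_py content out) := by unfold Spec_enhance_logic_py; infer_instance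

-- ===== CLAIM (what is proved, stated in full; the proofs are below) =====
def Claim_equal_enhance_logic_py : Prop := ∀ (content : String), Dom_enhance_logic_py content → Spec_enhance_logic_py content (enhance_logic_py content)

-- ===== LEMMAS AND PROOFS =====

-- A's pvSetup on the char-list side
def pvSetupC : List (List Char) := pvSetup.map String.toList

-- the common reference: A's first-match insertion on a list of lines (Strings / char lists)
def pvRel : List String → List String
  | [] => []
  | l :: rs => if pvCond l then l :: (pvSetup ++ rs) else l :: pvRel rs

def pvRelC : List (List Char) → List (List Char)
  | [] => []
  | l :: rs => if pvCondC l then l :: (pvSetupC ++ rs) else l :: pvRelC rs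

-- the line decomposition of a char list (what splitOn by '\n' computes)
def linesOf : List Char → List (List Char)
  | [] => [[]]
  | c :: rs =>
    if c = '\n' then [] :: linesOf rs
    else
      match linesOf rs with
      | [] => [[c]]
      | L :: Ls => (c :: L) :: Ls

theorem linesOf_ne_nil (cs : List Char) : linesOf cs ≠ [] := by
  induction cs with
  | nil => simp [linesOf]
  | cons c rs ih =>
    simp only [linesOf]
    split
    · simp
    · split <;> simp

theorem pvRelC_ne_nil (L : List (List Char)) (h : L ≠ []) : pvRelC L ≠ [] := by
  cases L with
  | nil => simp at h
  | cons l rs => simp only [pvRelC]; split <;> simp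

-- splitOn.go with enough fuel computes linesOf
set_option maxRecDepth 4096 in
theorem go_spec (fuel : Nat) : ∀ (l cur : List Char) (acc : List (List Char)),
    l.length < fuel →
    PySem.Chars.splitOn.go ['\n'] fuel l cur acc =
      acc.reverse ++
        (match linesOf l with
         | [] => []
         | L :: Ls => (cur.reverse ++ L) :: Ls) := by
  induction fuel with
  | zero => intro l cur acc h; omega
  | succ n ih =>
    intro l cur acc h
    cases l with
    | nil => simp [PySem.Chars.splitOn.go, linesOf]
    | cons c rest =>
      by_cases hc : c = '\n'
      · subst hc
        have hpre : ['\n'].isPrefixOf ('\n' :: rest) = true := by simp [List.isPrefixOf]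
        rw [PySem.Chars.splitOn.go]
        simp only [hpre, if_true, List.length_cons, List.length_nil, List.drop_succ_cons, List.drop_zero]
        rw [ih rest [] (cur.reverse :: acc) (by simpa using Nat.lt_of_succ_lt_succ h)]
        have := linesOf_ne_nil rest
        cases hrl : linesOf rest with
        | nil => exact absurd hrl this
        | cons L Ls =>
          rw [show linesOf ('\n' :: rest) = [] :: linesOf rest from by simp [linesOf], hrl]
          simp only [List.reverse_cons, List.append_assoc, List.singleton_append, List.reverse_nil, List.nil_append, List.append_nil]
      · have hpre : ['\n'].isPrefixOf (c :: rest) = false := by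
          simp only [List.isPrefixOf, List.isPrefixOf_nil_left, Bool.and_true, beq_eq_false_iff_ne, ne_eq]
          exact fun h => hc h.symm
        rw [PySem.Chars.splitOn.go]
        simp only [hpre, Bool.false_eq_true, if_false]
        rw [ih rest (c :: cur) acc (by simpa using Nat.lt_of_succ_lt_succ h)]
        have := linesOf_ne_nil rest
        cases hrl : linesOf rest with
        | nil => exact absurd hrl this
        | cons L Ls =>
          rw [show linesOf (c :: rest) = (c :: L) :: Ls from by rw [linesOf, if_neg hc, hrl]]
          simp only [List.reverse_cons, List.append_assoc, List.singleton_append]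

theorem splitOn_eq_linesOf (cs : List Char) :
    PySem.Chars.splitOn cs ['\n'] = linesOf cs := by
  rw [PySem.Chars.splitOn, go_spec (cs.length + 1) cs [] [] (by omega)]
  have := linesOf_ne_nil cs
  cases hrl : linesOf cs with
  | nil => exact absurd hrl this
  | cons L Ls => simp

-- linesOf in takeWhile/dropWhile form (the shape bScan recurses on)
theorem linesOf_take_drop (cs : List Char) :
    linesOf cs =
      cs.takeWhile (· != '\n') ::
        (match cs.dropWhile (· != '\n') with
         | [] => []
         | _ :: rs => linesOf rs) := by
  induction cs with
  | nil => simp [linesOf]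
  | cons c rest ih =>
    by_cases hc : c = '\n'
    · subst hc; simp [linesOf, List.takeWhile_cons, List.dropWhile_cons]
    · have hb : (c != '\n') = true := by simpa using hc
      simp only [linesOf, hc, if_false, List.takeWhile_cons, List.dropWhile_cons, hb, if_true]
      rw [ih]

-- join by '\n' undoes linesOf
theorem join_cons_head (c : Char) (L : List Char) (Ls : List (List Char)) :
    PySem.Chars.join ['\n'] ((c :: L) :: Ls) = c :: PySem.Chars.join ['\n'] (L :: Ls) := by
  cases Ls with
  | nil => simp [PySem.Chars.join_singleton]
  | cons M Ms => rw [PySem.Chars.join_cons_cons, PySem.Chars.join_cons_cons]; simp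

theorem join_linesOf (cs : List Char) :
    PySem.Chars.join ['\n'] (linesOf cs) = cs := by
  induction cs with
  | nil => simp [linesOf, PySem.Chars.join_singleton]
  | cons c rest ih =>
    by_cases hc : c = '\n'
    · subst hc
      have := linesOf_ne_nil rest
      cases hrl : linesOf rest with
      | nil => exact absurd hrl this
      | cons L Ls =>
        rw [hrl] at ih
        simp only [linesOf, if_true, hrl]
        rw [PySem.Chars.join_cons_cons, ih]
        simp
    · have := linesOf_ne_nil rest
      cases hrl : linesOf rest with
      | nil => exact absurd hrl this
      | cons L Ls =>
        rw [hrl] at ih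
        simp only [linesOf, hc, if_false, hrl]
        rw [join_cons_head, ih]

-- head of a nonempty dropWhile fails the predicate
theorem dropWhile_head_false (p : Char → Bool) (cs : List Char) (c : Char) (rs : List Char)
    (h : cs.dropWhile p = c :: rs) : p c = false := by
  have hw : cs.dropWhile p ≠ [] := by simp [h]
  have := List.head_dropWhile_not p hw
  simpa [h] using this

-- bScan computes join ∘ pvRelC ∘ linesOf
theorem bScan_eq (cs : List Char) :
    bScan cs = PySem.Chars.join ['\n'] (pvRelC (linesOf cs)) := by
  rw [bScan]
  rw [linesOf_take_drop cs]
  set line := cs.takeWhile (· != '\n') with hline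
  cases hd : cs.dropWhile (· != '\n') with
  | nil =>
    simp only [pvRelC]
    by_cases hc : pvCondC line = true
    · simp only [hc, if_true]
      rw [show PySem.Chars.join ['\n'] (line :: (pvSetupC ++ [])) = line ++ pvBlock by
        simp only [List.append_nil]
        rw [show pvSetupC = ([] : List Char) :: ("    def setUp(self):".toList) :: ("        \"\"\"Set up test fixtures.\"\"\"".toList) :: ("        pass".toList) :: [([] : List Char)] from rfl]
        rw [PySem.Chars.join_cons_cons, PySem.Chars.join_cons_cons, PySem.Chars.join_cons_cons, PySem.Chars.join_cons_cons, PySem.Chars.join_cons_cons, PySem.Chars.join_singleton]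
        simp [pvBlock]]
      simp [hd]
    · simp only [hc, Bool.false_eq_true, if_false, pvRelC, PySem.Chars.join_singleton]
      conv_lhs => rw [← List.takeWhile_append_dropWhile (p := (· != '\n')) (l := cs)]
      simp [hd, hline]
  | cons c rs =>
    have hc' : c = '\n' := by
      have := dropWhile_head_false _ _ _ _ hd; simpa using this
    subst hc'
    simp only [pvRelC]
    by_cases hc : pvCondC line = true
    · simp only [hc, if_true, hd]
      have hjoin :
          PySem.Chars.join ['\n'] (line :: (pvSetupC ++ linesOf rs)) =
            line ++ pvBlock ++ '\n' :: PySem.Chars.join ['\n'] (linesOf rs) := by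
        have := linesOf_ne_nil rs
        cases hrl : linesOf rs with
        | nil => exact absurd hrl this
        | cons L Ls =>
          rw [show pvSetupC ++ L :: Ls = ([] : List Char) :: ("    def setUp(self):".toList) :: ("        \"\"\"Set up test fixtures.\"\"\"".toList) :: ("        pass".toList) :: ([] : List Char) :: L :: Ls from rfl]
          rw [PySem.Chars.join_cons_cons, PySem.Chars.join_cons_cons, PySem.Chars.join_cons_cons, PySem.Chars.join_cons_cons, PySem.Chars.join_cons_cons, PySem.Chars.join_cons_cons]
          simp [pvBlock]
      rw [hjoin]
      rw [join_linesOf rs]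
    · simp only [hc, Bool.false_eq_true, if_false, hd]
      rw [bScan_eq rs]
      have hne := pvRelC_ne_nil (linesOf rs) (linesOf_ne_nil rs)
      cases hp : pvRelC (linesOf rs) with
      | nil => exact absurd hp hne
      | cons P Ps =>
        rw [PySem.Chars.join_cons_cons]
        simp
termination_by cs.length
decreasing_by
  have h1 : (cs.dropWhile (· != '\n')).length ≤ cs.length := List.length_dropWhile_le _ _
  rw [hd] at h1; simp at h1; omega

-- A's enumerate/splice loop computes pvRel (String side)
theorem aLoop_eq_rel (rest : List String) : ∀ (pre : List String),
    aLoop (pre ++ rest) pre.length rest = pre ++ pvRel rest := by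
  induction rest with
  | nil => intro pre; simp [aLoop, pvRel]
  | cons l rs ih =>
    intro pre
    by_cases h : pvCond l = true
    · have ht : List.take (pre.length + 1) (pre ++ l :: rs) = pre ++ [l] := by
        rw [show pre ++ l :: rs = (pre ++ [l]) ++ rs by simp, List.take_left' (by simp)]
      have hd : List.drop (pre.length + 1) (pre ++ l :: rs) = rs := by
        rw [show pre ++ l :: rs = (pre ++ [l]) ++ rs by simp, List.drop_left' (by simp)]
      simp [aLoop, pvRel, h, ht, hd]
    · have h' := ih (pre ++ [l])
      simp only [aLoop, pvRel, h, Bool.false_eq_true, if_false]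
      simpa using h'

-- bridges between the String and char-list sides
theorem pvCond_ofList (l : List Char) : pvCond (String.ofList l) = pvCondC l := by
  simp [pvCond, pvCondC]

theorem pvRel_map_ofList (L : List (List Char)) :
    pvRel (L.map String.ofList) = (pvRelC L).map String.ofList := by
  induction L with
  | nil => simp [pvRel, pvRelC]
  | cons l rs ih =>
    simp only [List.map_cons, pvRel, pvRelC, pvCond_ofList]
    by_cases h : pvCondC l = true
    · simp [h, pvSetupC, pvSetup]
    · simp [h, ih]

-- ===== VERDICT (by name: the statement is the Claim_ definition above) =====
theorem enhance_logic_py_spec : Claim_equal_enhance_logic_py := by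
  intro content _
  unfold Spec_enhance_logic_py enhance_logic_py enhance_logic_py_alt
  simp only []
  congr 1
  split_ifs with h
  · have hlines : (PySem.Str.split? content "\n").getD [] =
        (PySem.Chars.splitOn content.toList ['\n']).map String.ofList := by
      simp [PySem.Str.split?, PySem.Chars.split?]
    rw [hlines]
    have ha := aLoop_eq_rel ((PySem.Chars.splitOn content.toList ['\n']).map String.ofList) []
    simp only [List.nil_append, List.length_nil] at ha
    rw [ha, splitOn_eq_linesOf, pvRel_map_ofList, bScan_eq]
    apply String.toList_inj.mp
    rw [PySem.Str.toList_join, String.toList_ofList]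
    simp [List.map_map, Function.comp_def, String.toList_ofList]
  · rfl
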